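-- pv_equiv track=rewrite | github.com/tonno123/geocoding-nlp | implementation/spatial_identifier_extraction.py | chooseADP
-- ===== SOURCE A (Python) =====
-- def chooseADP(ADPlist):
--     if not ADPlist:
--         return None
--     result_list = []
--     for ADP in ADPlist:
--         result_list.append(predicateSwitcher(ADP))
--     if 'INTERSECT' in result_list:
--         return 'INTERSECT'
--     else:
--         return result_list[-1]
--
-- def predicateSwitcher(ADP):
--     switcher = { #nabij?
--         'op'        : 'ON',
--         'over'      : 'ON',
--         'te'        : 'IN_LOC',
--         'in'        : 'IN_LOC',
--         'bij'       : 'AT',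
--         'nabij'     : 'AT',
--         'hoogte'    : 'AT',
--         'richting'  : 'HEADING',
--         'naar'      : 'HEADING',
--         'tussen'    : 'BETWEEN',
--         'kruising'  : 'INTERSECT',
--         'kruispunt' : 'INTERSECT',
--         'splitsing' : 'INTERSECT',
--         't-splitsing':'INTERSECT'
--     }
--     return switcher.get(ADP)
-- ===== SOURCE B (Python) =====
-- def chooseADP(ADPlist):
--     if not ADPlist:
--         return None
--     last = None
--     for ADP in ADPlist:
--         last = predicateSwitcher(ADP)
--         if last == 'INTERSECT':
--             return 'INTERSECT'
--     return last
--
-- def predicateSwitcher(ADP):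
--     switcher = {
--         'op'        : 'ON',
--         'over'      : 'ON',
--         'te'        : 'IN_LOC',
--         'in'        : 'IN_LOC',
--         'bij'       : 'AT',
--         'nabij'     : 'AT',
--         'hoogte'    : 'AT',
--         'richting'  : 'HEADING',
--         'naar'      : 'HEADING',
--         'tussen'    : 'BETWEEN',
--         'kruising'  : 'INTERSECT',
--         'kruispunt' : 'INTERSECT',
--         'splitsing' : 'INTERSECT',
--         't-splitsing':'INTERSECT'
--     }
--     return switcher.get(ADP)
-- ===== Notes on version B (the rewrite author's own statement) =====
-- stated objective: simpler
-- what changed: Single early-exit pass keeping only the most recent code in a variable, instead of materialising the full code list and then doing a membership test plus a last-element lookup.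
import Mathlib
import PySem

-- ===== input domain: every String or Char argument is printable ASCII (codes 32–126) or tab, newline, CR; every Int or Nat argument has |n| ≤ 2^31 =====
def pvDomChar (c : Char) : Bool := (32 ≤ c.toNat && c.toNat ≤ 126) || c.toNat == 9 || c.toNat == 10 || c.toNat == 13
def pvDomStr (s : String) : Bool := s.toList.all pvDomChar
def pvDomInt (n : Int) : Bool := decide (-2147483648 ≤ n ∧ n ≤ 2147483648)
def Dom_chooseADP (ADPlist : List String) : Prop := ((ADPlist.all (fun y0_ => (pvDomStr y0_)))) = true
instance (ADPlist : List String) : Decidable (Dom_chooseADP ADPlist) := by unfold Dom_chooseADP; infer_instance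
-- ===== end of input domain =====

-- B replaces A's two passes (build result_list, then membership test + last element)
-- by a single early-exit pass keeping only the most recent code; objective: simpler.

-- ===== PORT A =====
-- dict literal of predicateSwitcher (shared context helper, identical in A and B)
def switcherDict : PySem.Dict String String :=
  PySem.Dict.ofList
    [("op", "ON"), ("over", "ON"), ("te", "IN_LOC"), ("in", "IN_LOC"),
     ("bij", "AT"), ("nabij", "AT"), ("hoogte", "AT"),
     ("richting", "HEADING"), ("naar", "HEADING"), ("tussen", "BETWEEN"),
     ("kruising", "INTERSECT"), ("kruispunt", "INTERSECT"),
     ("splitsing", "INTERSECT"), ("t-splitsing", "INTERSECT")]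

def predicateSwitcher (ADP : String) : Option String :=
  switcherDict.get? ADP

def chooseADP (ADPlist : List String) : Option String :=
  if ADPlist = [] then none
  else
    -- result_list built by appending in a loop
    let result_list := ADPlist.foldl (fun acc ADP => acc ++ [predicateSwitcher ADP]) []
    if (some "INTERSECT") ∈ result_list then some "INTERSECT"
    else (PySem.List.pyGet? result_list (-1)).join   -- result_list[-1]; join: it is itself an Option, returned as-is

-- ===== PORT B =====
-- single pass with early exit, carrying the most recent code
def chooseGo : List String → Option String → Option String
  | [], last => last
  | ADP :: rest, _ =>
      let code := predicateSwitcher ADP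
      if code = some "INTERSECT" then some "INTERSECT" else chooseGo rest code

def chooseADP_alt (ADPlist : List String) : Option String :=
  if ADPlist = [] then none
  else chooseGo ADPlist none

-- ===== PRECONDITION & SPEC =====
def Spec_chooseADP (ADPlist : List String) (out : Option String) : Prop := out = chooseADP_alt ADPlist
instance (ADPlist : List String) (out : Option String) : Decidable (Spec_chooseADP ADPlist out) := by unfold Spec_chooseADP; infer_instance

-- ===== CLAIM (what is proved, stated in full; the proofs are below) =====
def Claim_equal_chooseADP : Prop := ∀ (ADPlist : List String), Dom_chooseADP ADPlist → Spec_chooseADP ADPlist (chooseADP ADPlist)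

-- ===== LEMMAS AND PROOFS =====

theorem foldl_append_map {α β : Type} (f : α → β) :
    ∀ (l : List α) (acc : List β),
      l.foldl (fun acc a => acc ++ [f a]) acc = acc ++ l.map f := by
  intro l
  induction l with
  | nil => simp
  | cons a t ih => intro acc; simp [List.foldl, ih]

theorem chooseGo_spec :
    ∀ (l : List String) (last0 : Option String), l ≠ [] →
      chooseGo l last0 =
        if (some "INTERSECT") ∈ l.map predicateSwitcher then some "INTERSECT"
        else (l.map predicateSwitcher).getLast?.join := by
  intro l
  induction l with
  | nil => intro _ h; exact absurd rfl h
  | cons a t ih =>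
    intro last0 _
    by_cases hc : predicateSwitcher a = some "INTERSECT"
    · simp [chooseGo, hc]
    · have hc' : ¬ some "INTERSECT" = predicateSwitcher a := fun h => hc h.symm
      cases t with
      | nil => simp [chooseGo, hc, hc']
      | cons b u =>
        have ht : b :: u ≠ ([] : List String) := by simp
        have step : chooseGo (a :: b :: u) last0 = chooseGo (b :: u) (predicateSwitcher a) := by
          simp [chooseGo, hc]
        rw [step, ih _ ht]
        simp [hc', List.getLast?_cons_cons]

-- ===== VERDICT (by name: the statement is the Claim_ definition above) =====
theorem chooseADP_spec : Claim_equal_chooseADP := by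
  intro l _
  unfold Spec_chooseADP chooseADP chooseADP_alt
  by_cases h : l = []
  · simp [h]
  · rw [if_neg h, if_neg h, chooseGo_spec l none h, foldl_append_map]
    simp [PySem.List.pyGet?_neg_one]
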